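-- pv_equiv track=rewrite | github.com/SameerJain/CodepathTP101 | unit_2_dictionaries/scratch.py | get_highest_priority_task
-- ===== SOURCE A (Python) =====
-- def get_highest_priority_task(tasks):
--
--     highest_priority_num = 0
--     highest_task = ""
--     for key, value in tasks.items():
--         if value > highest_priority_num:
--             highest_priority_num = value
--             highest_task = key
--         elif value == highest_priority_num:
--             highest_task = min(highest_task,key)
--
--     tasks.pop(highest_task)
--
--     return highest_task
-- ===== SOURCE B (Python) =====
-- def get_highest_priority_task(tasks):
--     m = max(tasks.values())
--     best = min(k for k, v in tasks.items() if v == m)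
--     tasks.pop(best)
--     return best
-- ===== Notes on version B (the rewrite author's own statement) =====
-- stated objective: alternative
-- what changed: A's single scan that accumulates a running (max value, min key) pair seeded with the (0, "") sentinel is replaced by two explicit passes: max over the values, then min over the keys attaining that maximum.
-- intended difference: When every value is <= 0 and the dict has a task named "" whose value is below the maximum, A returns "" (its sentinel collides with the real key, popping the wrong task) while B returns the smallest-named task with the maximum value, which is the intended highest-priority task. — e.g. on get_highest_priority_task([("", -1), ("a", 0)]): A returns "", B returns "a"
-- outside the precondition, e.g. on get_highest_priority_task({}): A raises KeyError, B raises ValueError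
import Mathlib
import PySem

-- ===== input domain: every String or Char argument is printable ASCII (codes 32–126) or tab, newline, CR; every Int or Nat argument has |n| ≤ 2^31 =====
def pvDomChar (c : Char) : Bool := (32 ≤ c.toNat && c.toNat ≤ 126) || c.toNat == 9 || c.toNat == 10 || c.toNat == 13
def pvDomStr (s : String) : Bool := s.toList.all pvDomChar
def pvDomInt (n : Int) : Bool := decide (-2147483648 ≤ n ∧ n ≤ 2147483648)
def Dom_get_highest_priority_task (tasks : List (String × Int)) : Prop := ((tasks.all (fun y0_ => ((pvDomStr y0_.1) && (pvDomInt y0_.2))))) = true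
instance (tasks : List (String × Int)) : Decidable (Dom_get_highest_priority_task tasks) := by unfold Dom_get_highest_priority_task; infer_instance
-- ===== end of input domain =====

-- B splits A's single accumulating scan into a max-over-values pass and a min-key-among-max pass;
-- equivalence is about the RETURN value only (both A and B also pop the returned key from the dict,
-- different keys on the D_ inputs below).

-- ===== PORT A =====
-- A's loop body (the two-branch update of (highest_priority_num, highest_task)).
def pvStepA (st : Int × String) (kv : String × Int) : Int × String :=
  if kv.2 > st.1 then (kv.2, kv.1)
  else if kv.2 == st.1 then (st.1, min st.2 kv.1)
  else st

def get_highest_priority_task (tasks : List (String × Int)) : String :=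
  let d := PySem.Dict.ofList tasks
  let st := d.items.foldl pvStepA ((0 : Int), "")
  -- tasks.pop(highest_task) raises KeyError when highest_task is not a key — excluded by Pre_
  st.2

-- ===== PORT B =====
def get_highest_priority_task_alt (tasks : List (String × Int)) : String :=
  let d := PySem.Dict.ofList tasks
  match PySem.List.max? d.values (fun v => v) with
  | none => ""          -- max() of an empty dict raises ValueError — excluded by Pre_
  | some m =>
    match PySem.List.min? ((d.items.filter (fun kv => kv.2 == m)).map (fun kv => kv.1)) (fun k => k) with
    | none => ""        -- unreachable: the maximum value is attained by some key
    | some best => best -- tasks.pop(best) always succeeds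

-- ===== PRECONDITION & SPEC =====
-- Pre_ is exactly where Python A returns: some value is positive, or "" is a key (otherwise
-- tasks.pop("") raises KeyError — on the empty dict and when no value beats the 0/"" sentinel).
def Pre_get_highest_priority_task (tasks : List (String × Int)) : Prop :=
  (∃ p ∈ (PySem.Dict.ofList tasks).items, 0 < p.2) ∨ (PySem.Dict.ofList tasks).get? "" ≠ none
instance (tasks : List (String × Int)) : Decidable (Pre_get_highest_priority_task tasks) := by
  unfold Pre_get_highest_priority_task; infer_instance

def pvWitness_get_highest_priority_task : (List (String × Int)) := [("a", 1)]

-- When every value is ≤ 0 and the dict has a task named "" whose value is below the maximum,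
-- A returns "" (its sentinel collides with the real key and the wrong task is popped), while B
-- returns the smallest-named task with the maximum value — the intended highest-priority task.
def D_get_highest_priority_task (tasks : List (String × Int)) : Prop :=
  (∀ p ∈ (PySem.Dict.ofList tasks).items, p.2 ≤ 0) ∧
  (∃ p ∈ (PySem.Dict.ofList tasks).items, p.1 = "" ∧
    ∃ q ∈ (PySem.Dict.ofList tasks).items, p.2 < q.2)
instance (tasks : List (String × Int)) : Decidable (D_get_highest_priority_task tasks) := by
  unfold D_get_highest_priority_task; infer_instance

def Spec_get_highest_priority_task (tasks : List (String × Int)) (out : String) : Prop :=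
  ¬ D_get_highest_priority_task tasks → out = get_highest_priority_task_alt tasks
instance (tasks : List (String × Int)) (out : String) : Decidable (Spec_get_highest_priority_task tasks out) := by
  unfold Spec_get_highest_priority_task; infer_instance

def pvDiffWitness_get_highest_priority_task : (List (String × Int)) := [("", -1), ("a", 0)]
def pvDiffWitnessOut_get_highest_priority_task : String × String := ("", "a")

-- ===== CLAIM (what is proved, stated in full; the proofs are below) =====
def Claim_unchanged_get_highest_priority_task : Prop := ∀ (tasks : List (String × Int)), Dom_get_highest_priority_task tasks → Pre_get_highest_priority_task tasks → Spec_get_highest_priority_task tasks (get_highest_priority_task tasks)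
def Claim_changed_get_highest_priority_task : Prop := Dom_get_highest_priority_task (pvDiffWitness_get_highest_priority_task) ∧ Pre_get_highest_priority_task (pvDiffWitness_get_highest_priority_task) ∧ D_get_highest_priority_task (pvDiffWitness_get_highest_priority_task) ∧ get_highest_priority_task (pvDiffWitness_get_highest_priority_task) = pvDiffWitnessOut_get_highest_priority_task.1 ∧ get_highest_priority_task_alt (pvDiffWitness_get_highest_priority_task) = pvDiffWitnessOut_get_highest_priority_task.2 ∧ pvDiffWitnessOut_get_highest_priority_task.1 ≠ pvDiffWitnessOut_get_highest_priority_task.2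
def Claim_exact_get_highest_priority_task : Prop := ∀ (tasks : List (String × Int)), Dom_get_highest_priority_task tasks → Pre_get_highest_priority_task tasks → D_get_highest_priority_task tasks → get_highest_priority_task tasks ≠ get_highest_priority_task_alt tasks

-- ===== LEMMAS AND PROOFS =====

-- A's running maximum over a prefix: max(0, values seen so far)
def pvM (l : List (String × Int)) : Int := l.foldl (fun a p => max a p.2) 0
-- the keys whose value is m, in order
def pvKeysAt (l : List (String × Int)) (m : Int) : List String :=
  (l.filter (fun kv => kv.2 == m)).map (fun kv => kv.1)
-- the least such key ("" when there is none)
def pvK (l : List (String × Int)) (m : Int) : String :=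
  match pvKeysAt l m with
  | [] => ""
  | x :: t => t.foldl min x

lemma pv_empty_le (s : String) : "" ≤ s := by
  rw [String.le_iff_toList_le]; exact not_lt.mp (List.not_lt_nil _)

lemma pvM_bounds (l : List (String × Int)) : 0 ≤ pvM l ∧ ∀ p ∈ l, p.2 ≤ pvM l :=
  PySem.List.le_foldl_max_int l (fun p => p.2) 0

lemma pvM_append (l : List (String × Int)) (kv : String × Int) :
    pvM (l ++ [kv]) = max (pvM l) kv.2 := by
  simp [pvM, List.foldl_append]

lemma pvM_eq_foldl_map (l : List (String × Int)) :
    pvM l = (l.map (fun p => p.2)).foldl max 0 := by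
  simp [pvM, List.foldl_map]

lemma pvM_mem (l : List (String × Int)) (h : 0 < pvM l) : ∃ p ∈ l, p.2 = pvM l := by
  rcases PySem.List.foldl_max_mem (l.map (fun p => p.2)) 0 with h0 | hm
  · rw [pvM_eq_foldl_map] at h; omega
  · rw [pvM_eq_foldl_map]
    rcases List.mem_map.mp hm with ⟨p, hp, hpe⟩
    exact ⟨p, hp, hpe⟩

lemma pvKeysAt_append (l : List (String × Int)) (kv : String × Int) (m : Int) :
    pvKeysAt (l ++ [kv]) m = pvKeysAt l m ++ (if kv.2 = m then [kv.1] else []) := by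
  by_cases h : kv.2 = m <;> simp [pvKeysAt, List.filter_append, h]

lemma foldA_eq (l : List (String × Int)) :
    l.foldl pvStepA ((0 : Int), "") = (pvM l, if 0 < pvM l then pvK l (pvM l) else "") := by
  induction l using List.reverseRecOn with
  | nil => simp [pvM]
  | append_singleton l kv ih =>
    rw [List.foldl_append, ih, pvM_append]
    simp only [List.foldl_cons, List.foldl_nil, pvStepA]
    have hb := pvM_bounds l
    by_cases h1 : pvM l < kv.2
    · have hmax : max (pvM l) kv.2 = kv.2 := max_eq_right (le_of_lt h1)
      have hpos : 0 < kv.2 := lt_of_le_of_lt hb.1 h1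
      have hfilt : pvKeysAt l kv.2 = [] := by
        simp only [pvKeysAt, List.map_eq_nil_iff, List.filter_eq_nil_iff]
        intro p hp
        have := hb.2 p hp
        simp only [beq_iff_eq]
        omega
      have hK : pvK (l ++ [kv]) kv.2 = kv.1 := by
        simp [pvK, pvKeysAt_append, hfilt]
      rw [hmax, if_pos h1, if_pos hpos, hK]
    · by_cases h2 : kv.2 = pvM l
      · have hmax : max (pvM l) kv.2 = pvM l := max_eq_left (le_of_eq h2)
        rw [hmax]
        by_cases h3 : 0 < pvM l
        · -- the filtered list over l is nonempty: the max is attained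
          rcases pvM_mem l h3 with ⟨p, hp, hpe⟩
          have hmem : p.1 ∈ pvKeysAt l (pvM l) := by
            simp only [pvKeysAt, List.mem_map]
            exact ⟨p, List.mem_filter.mpr ⟨hp, by simp [hpe]⟩, rfl⟩
          rcases hx : pvKeysAt l (pvM l) with _ | ⟨x, t⟩
          · rw [hx] at hmem; simp at hmem
          · have hK' : pvK (l ++ [kv]) (pvM l) = min (pvK l (pvM l)) kv.1 := by
              simp only [pvK, pvKeysAt_append, hx, if_pos h2]
              simp [List.foldl_append]
            rw [if_neg (show ¬ ((pvM l, if 0 < pvM l then pvK l (pvM l) else "").1 < kv.2) by simp; omega),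
              if_pos (show (kv.2 == (pvM l, if 0 < pvM l then pvK l (pvM l) else "").1) = true by simp [h2])]
            simp [h3, hK']
        · have h0 : pvM l = 0 := by omega
          rw [if_neg (show ¬ ((pvM l, if 0 < pvM l then pvK l (pvM l) else "").1 < kv.2) by simp; omega),
            if_pos (show (kv.2 == (pvM l, if 0 < pvM l then pvK l (pvM l) else "").1) = true by simp [h2])]
          simp [h3, min_eq_left (pv_empty_le kv.1)]
      · -- kv.2 < pvM l : state and filtered keys both unchanged
        have hlt : kv.2 < pvM l := by
          rcases lt_trichotomy kv.2 (pvM l) with h | h | h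
          · exact h
          · exact absurd h h2
          · exact absurd h h1
        have hmax : max (pvM l) kv.2 = pvM l := max_eq_left (le_of_lt hlt)
        have hK : pvK (l ++ [kv]) (pvM l) = pvK l (pvM l) := by
          simp [pvK, pvKeysAt_append, h2]
        rw [if_neg (show ¬ ((pvM l, if 0 < pvM l then pvK l (pvM l) else "").1 < kv.2) by simp; omega),
          if_neg (show ¬ ((kv.2 == (pvM l, if 0 < pvM l then pvK l (pvM l) else "").1) = true) by simp [h2]),
          hmax, hK]

-- relating Python's max(values) to A's 0-seeded running maximum
lemma pvM_of_max? (l : List (String × Int)) (m : Int)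
    (h : PySem.List.max? (l.map (fun p => p.2)) (fun v => v) = some m) :
    pvM l = max 0 m := by
  rcases hv : l.map (fun p => p.2) with _ | ⟨v, t⟩
  · rw [hv] at h; simp [PySem.List.max?] at h
  · rw [hv, PySem.List.max?_id_cons] at h
    have hm : m = t.foldl max v := by simpa using h.symm
    rw [pvM_eq_foldl_map, hv, hm]
    show List.foldl max (max 0 v) t = max 0 (List.foldl max v t)
    exact List.foldl_assoc

theorem get_highest_priority_task_spec : Claim_unchanged_get_highest_priority_task := by
  intro tasks _ hpre hnd
  unfold get_highest_priority_task get_highest_priority_task_alt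
  simp only []
  set d := PySem.Dict.ofList tasks with hd
  have hvals : d.values = d.items.map (fun p => p.2) := rfl
  rw [foldA_eq]
  rcases hmax : PySem.List.max? d.values (fun v => v) with _ | m
  all_goals dsimp only
  · -- empty dict: excluded by Pre_
    exfalso
    have hnil : d.items.map (fun p => p.2) = [] := by
      rw [← hvals]; exact (PySem.List.max?_eq_none_iff _ _).mp hmax
    have hinil : d.items = [] := List.map_eq_nil_iff.mp hnil
    rcases hpre with ⟨p, hp, _⟩ | hg
    · rw [hinil] at hp; simp at hp
    · exact hg ((PySem.Dict.get?_eq_none_iff_not_mem_keys d "").mpr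
        (by simp [PySem.Dict.keys, hinil]))
  · have hle : ∀ p ∈ d.items, p.2 ≤ m := by
      intro p hp
      exact PySem.List.max?_isMax hmax _ (by rw [hvals]; exact List.mem_map_of_mem hp)
    have hMm : pvM d.items = max 0 m := pvM_of_max? d.items m (by rw [← hvals]; exact hmax)
    by_cases hpos : 0 < m
    · -- positive maximum: both sides are the least key attaining m
      have hM : pvM d.items = m := by rw [hMm]; omega
      rcases PySem.List.max?_mem hmax with hmv
      rcases List.mem_map.mp (by rw [← hvals]; exact hmv) with ⟨p, hp, hpe⟩
      have hmem : p.1 ∈ pvKeysAt d.items m := by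
        simp only [pvKeysAt, List.mem_map]
        exact ⟨p, List.mem_filter.mpr ⟨hp, by simp [hpe]⟩, rfl⟩
      rcases hx : pvKeysAt d.items m with _ | ⟨x, t⟩
      · rw [hx] at hmem; simp at hmem
      · have : PySem.List.min? (pvKeysAt d.items m) (fun k => k) = some (t.foldl min x) := by
          rw [hx]; exact PySem.List.min?_id_cons x t
        rw [show ((d.items.filter (fun kv => kv.2 == m)).map (fun kv => kv.1)) = pvKeysAt d.items m from rfl, this]
        rw [hM, if_pos hpos]
        simp only [pvK, hx]
    · -- maximum ≤ 0: Pre_ forces "" to be a key, ¬D_ forces its value to be the maximum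
      have hM : pvM d.items = 0 := by rw [hMm]; omega
      have hall : ∀ p ∈ d.items, p.2 ≤ 0 := fun p hp => le_trans (hle p hp) (by omega)
      rcases hpre with ⟨p, hp, hpp⟩ | hg
      · exact absurd hpp (by have := hall p hp; omega)
      rcases hw : d.get? "" with _ | w
      · exact absurd hw hg
      have hwm : ("", w) ∈ d.items := PySem.Dict.mem_items_of_get?_eq_some _ hw
      have hwle : ∀ q ∈ d.items, q.2 ≤ w := by
        intro q hq
        by_contra hlt
        exact hnd ⟨hall, ("", w), hwm, rfl, q, hq, by omega⟩
      have hweq : w = m := by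
        rcases List.mem_map.mp (by rw [← hvals]; exact PySem.List.max?_mem hmax) with ⟨q, hq, hqe⟩
        have h1 := hwle q hq
        have h2 := hle ("", w) hwm
        omega
      have hmem : "" ∈ pvKeysAt d.items m := by
        simp only [pvKeysAt, List.mem_map]
        exact ⟨("", w), List.mem_filter.mpr ⟨hwm, by simp [hweq]⟩, rfl⟩
      rcases hx : pvKeysAt d.items m with _ | ⟨x, t⟩
      · rw [hx] at hmem; simp at hmem
      · have hmin : PySem.List.min? (pvKeysAt d.items m) (fun k => k) = some (t.foldl min x) := by
          rw [hx]; exact PySem.List.min?_id_cons x t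
        rw [show ((d.items.filter (fun kv => kv.2 == m)).map (fun kv => kv.1)) = pvKeysAt d.items m from rfl, hmin]
        rw [hM, if_neg (by omega)]
        have hb : t.foldl min x ≤ "" := PySem.List.min?_isMin hmin _ hmem
        show ("" : String) = t.foldl min x
        exact le_antisymm (pv_empty_le _) hb

theorem get_highest_priority_task_changed : Claim_changed_get_highest_priority_task := by
  unfold Claim_changed_get_highest_priority_task
  refine ⟨by decide, by decide, by decide, ?_, by decide, by decide⟩
  rw [show get_highest_priority_task pvDiffWitness_get_highest_priority_task = min "" "a" from rfl,
    min_eq_left (pv_empty_le "a")]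
  rfl

theorem get_highest_priority_task_tight : Claim_exact_get_highest_priority_task := by
  intro tasks _ _ hD
  rcases hD with ⟨hall, p, hp, hp1, q, hq, hlt⟩
  unfold get_highest_priority_task get_highest_priority_task_alt
  simp only []
  set d := PySem.Dict.ofList tasks with hd
  have hvals : d.values = d.items.map (fun p => p.2) := rfl
  rw [foldA_eq]
  rcases hmax : PySem.List.max? d.values (fun v => v) with _ | m
  all_goals dsimp only
  · exfalso
    have hnil : d.items.map (fun p => p.2) = [] := by
      rw [← hvals]; exact (PySem.List.max?_eq_none_iff _ _).mp hmax
    rw [List.map_eq_nil_iff.mp hnil] at hq; simp at hq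
  · have hle : ∀ r ∈ d.items, r.2 ≤ m := by
      intro r hr
      exact PySem.List.max?_isMax hmax _ (by rw [hvals]; exact List.mem_map_of_mem hr)
    have hmle : m ≤ 0 := by
      rcases List.mem_map.mp (by rw [← hvals]; exact PySem.List.max?_mem hmax) with ⟨r, hr, hre⟩
      have := hall r hr; omega
    have hM : pvM d.items = 0 := by
      rw [pvM_of_max? d.items m (by rw [← hvals]; exact hmax)]; omega
    rw [hM, if_neg (by omega)]
    -- B returns the least key attaining m; it cannot be "" since ""'s value is below m
    rcases List.mem_map.mp (by rw [← hvals]; exact PySem.List.max?_mem hmax) with ⟨r, hr, hre⟩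
    have hmem : r.1 ∈ pvKeysAt d.items m := by
      simp only [pvKeysAt, List.mem_map]
      exact ⟨r, List.mem_filter.mpr ⟨hr, by simp [hre]⟩, rfl⟩
    rcases hx : pvKeysAt d.items m with _ | ⟨x, t⟩
    · rw [hx] at hmem; simp at hmem
    · have hmin : PySem.List.min? (pvKeysAt d.items m) (fun k => k) = some (t.foldl min x) := by
        rw [hx]; exact PySem.List.min?_id_cons x t
      rw [show ((d.items.filter (fun kv => kv.2 == m)).map (fun kv => kv.1)) = pvKeysAt d.items m from rfl, hmin]
      intro heq
      have heq' : ("" : String) = t.foldl min x := heq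
      -- so the returned key is "", i.e. ("", m) ∈ items; but ("", p.2) ∈ items with p.2 < m
      have hbmem : t.foldl min x ∈ pvKeysAt d.items m := by
        rw [hx]
        exact PySem.List.min?_mem (by rw [← hx]; exact hmin)
      rcases List.mem_map.mp hbmem with ⟨s, hs, hse⟩
      have hsf := List.mem_filter.mp hs
      have hsm : s.2 = m := by simpa using hsf.2
      have hs1 : s.1 = "" := by rw [hse, ← heq']
      have hnodup : d.keys.Nodup := PySem.Dict.nodup_keys_ofList tasks
      have h1 : d.get? s.1 = some s.2 :=
        PySem.Dict.get?_of_mem_items _ (by rw [← Prod.mk.eta (p := s)] at hsf; exact hsf.1) hnodup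
      have h2 : d.get? p.1 = some p.2 :=
        PySem.Dict.get?_of_mem_items _ (by rw [← Prod.mk.eta (p := p)] at hp; exact hp) hnodup
      rw [hs1] at h1
      rw [hp1] at h2
      rw [h1] at h2
      have : s.2 = p.2 := by simpa using h2
      have hqm := hle q hq
      omega
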